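-- pv_equiv track=rewrite | github.com/xatrarana/threatintel | zeroday_visualizer.py | break_long_words
-- ===== SOURCE A (Python) =====
-- def break_long_words(text: str, max_len: int = 60) -> str:
--     """Insert spaces inside very long 'words' (e.g., URLs) so FPDF can wrap."""
--     if not text:
--         return ""
--     text = str(text)
--     parts = []
--     for word in text.split(" "):
--         if len(word) <= max_len:
--             parts.append(word)
--         else:
--             parts.extend(word[i:i + max_len] for i in range(0, len(word), max_len))
--     return " ".join(parts)
-- ===== SOURCE B (Python) =====
-- def break_long_words(text: str, max_len: int = 60) -> str:
--     """Insert spaces inside very long 'words' (e.g., URLs) so FPDF can wrap.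
--
--     One streaming pass: copy characters, counting the current run of
--     non-space characters; once the run would exceed max_len, emit a space
--     and start a new run.
--     """
--     if not text:
--         return ""
--     out = []
--     run = 0
--     for ch in str(text):
--         if ch == " ":
--             run = 0
--             out.append(ch)
--         elif run == max_len:
--             out.append(" ")
--             out.append(ch)
--             run = 1
--         else:
--             out.append(ch)
--             run += 1
--     return "".join(out)
-- ===== Notes on version B (the rewrite author's own statement) =====
-- stated objective: alternative
-- what changed: Replaces the split-on-space / chunk-each-word / join pipeline with a single streaming pass over the characters that keeps a run counter of consecutive non-space characters and emits an extra space whenever the run would exceed max_len.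
-- outside the precondition, e.g. on break_long_words('ab cd', -1): A returns '', B returns 'ab cd'; on break_long_words('   ', 0): A returns '   ', B returns '   '; on break_long_words('ab', 0): A raises ValueError, B returns ' ab'
import Mathlib
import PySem

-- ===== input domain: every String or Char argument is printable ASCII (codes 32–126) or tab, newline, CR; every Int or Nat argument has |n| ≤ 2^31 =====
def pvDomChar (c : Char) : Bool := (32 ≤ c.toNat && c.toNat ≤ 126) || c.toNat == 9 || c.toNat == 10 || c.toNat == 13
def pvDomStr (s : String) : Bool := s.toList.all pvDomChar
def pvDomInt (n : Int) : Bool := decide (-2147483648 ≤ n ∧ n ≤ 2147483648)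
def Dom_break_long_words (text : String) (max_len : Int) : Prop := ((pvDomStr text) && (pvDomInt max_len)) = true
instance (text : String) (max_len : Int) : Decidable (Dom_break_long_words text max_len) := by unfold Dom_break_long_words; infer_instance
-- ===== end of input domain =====

-- B replaces A's split/chunk/join pipeline by one streaming pass with a run counter
-- (alternative decomposition, same linear cost); equivalence proved under Pre_ (max_len >= 1 or empty text).


-- ===== PORT A =====
-- literal port of A: split on " ", keep short words, chunk long ones with
-- range(0, len(word), max_len) and word[i:i+max_len], then " ".join(parts).
def break_long_words (text : String) (max_len : Int) : String :=
  if text = "" then ""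
  else
    let parts : List (List Char) :=
      (PySem.Chars.splitOn text.toList [' ']).foldl
        (fun parts word =>
          if (word.length : Int) ≤ max_len then parts ++ [word]
          else parts ++ (PySem.List.pyRange 0 (word.length : Int) max_len).map
            (fun i => PySem.List.slice word (some i) (some (i + max_len)))) []
    String.ofList (PySem.Chars.join [' '] parts)

-- ===== PORT B =====
-- literal port of B: one fold over the characters carrying (output, run counter).
def break_long_words_alt (text : String) (max_len : Int) : String :=
  if text = "" then ""
  else
    let res :=
      text.toList.foldl
        (fun (acc : List Char × Int) ch =>
          if ch = ' ' then (acc.1 ++ [ch], 0)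
          else if acc.2 = max_len then (acc.1 ++ [' ', ch], 1)
          else (acc.1 ++ [ch], acc.2 + 1)) ([], 0)
    String.ofList res.1

-- ===== PRECONDITION & SPEC =====
-- Pre_ excludes non-positive max_len on nonempty text: a chunk size ≤ 0 is outside the
-- function's purpose — there A raises ValueError (max_len = 0 with a non-space character)
-- or returns "" dropping every word (max_len < 0), B returns the text unchanged, and no
-- caller specifies either behaviour.
def Pre_break_long_words (text : String) (max_len : Int) : Prop :=
  text = "" ∨ 1 ≤ max_len
instance (text : String) (max_len : Int) : Decidable (Pre_break_long_words text max_len) := by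
  unfold Pre_break_long_words; infer_instance

def pvWitness_break_long_words : String × Int := ("visit https://example.com/a/long/path now", 8)

def Spec_break_long_words (text : String) (max_len : Int) (out : String) : Prop := out = break_long_words_alt text max_len
instance (text : String) (max_len : Int) (out : String) : Decidable (Spec_break_long_words text max_len out) := by unfold Spec_break_long_words; infer_instance

-- ===== CLAIM (what is proved, stated in full; the proofs are below) =====
def Claim_equal_break_long_words : Prop := ∀ (text : String) (max_len : Int), Dom_break_long_words text max_len → Pre_break_long_words text max_len → Spec_break_long_words text max_len (break_long_words text max_len)

-- ===== LEMMAS AND PROOFS =====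

-- Proof-side view of split(" "): first word and the remaining words.
def pvSplitH : List Char → List Char × List (List Char)
  | [] => ([], [])
  | c :: cs =>
    let p := pvSplitH cs
    if c = ' ' then ([], p.1 :: p.2) else (c :: p.1, p.2)

-- Proof-side view of B's streaming pass as a structural recursion.
def pvStream (m : Int) : List Char → Int → List Char
  | [], _ => []
  | c :: cs, run =>
    if c = ' ' then ' ' :: pvStream m cs 0
    else if run = m then ' ' :: c :: pvStream m cs 1
    else c :: pvStream m cs (run + 1)

-- The streaming pass restricted to a single word (no spaces get reset).
def pvChunk (m : Int) : List Char → Int → List Char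
  | [], _ => []
  | c :: cs, run => if run = m then ' ' :: c :: pvChunk m cs 1 else c :: pvChunk m cs (run + 1)

-- A's chunk list for one long word, written over Nat.
def pvChunksN (mN : Nat) (w : List Char) (K : Nat) : List (List Char) :=
  (List.range K).map (fun k => (w.drop (mN * k)).take mN)

theorem pv_splitOn_go (l : List Char) : ∀ (fuel : Nat) (cur : List Char) (acc : List (List Char)),
    l.length ≤ fuel →
    PySem.Chars.splitOn.go [' '] fuel l cur acc
      = acc.reverse ++ (cur.reverse ++ (pvSplitH l).1) :: (pvSplitH l).2 := by
  induction l with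
  | nil =>
    intro fuel cur acc _
    cases fuel <;> simp [PySem.Chars.splitOn.go, pvSplitH]
  | cons c cs ih =>
    intro fuel cur acc hf
    cases fuel with
    | zero => simp at hf
    | succ f =>
      by_cases hc : c = ' '
      · subst hc
        simp only [PySem.Chars.splitOn.go, List.isPrefixOf, BEq.rfl, Bool.true_and,
          if_pos]
        have hd : List.drop [' '].length (' ' :: cs) = cs := rfl
        rw [hd, ih f [] (cur.reverse :: acc) (by simpa using Nat.le_of_succ_le_succ hf)]
        simp [pvSplitH]
      · simp only [PySem.Chars.splitOn.go, List.isPrefixOf, Bool.and_true]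
        rw [if_neg (by simpa using fun h => hc h.symm)]
        rw [ih f (c :: cur) acc (by simpa using Nat.le_of_succ_le_succ hf)]
        simp [pvSplitH, hc]

theorem pv_splitOn_eq (l : List Char) :
    PySem.Chars.splitOn l [' '] = (pvSplitH l).1 :: (pvSplitH l).2 := by
  unfold PySem.Chars.splitOn
  rw [pv_splitOn_go l (l.length + 1) [] [] (by omega)]
  simp

theorem pv_foldl_stream (m : Int) (l : List Char) : ∀ (out : List Char) (run : Int),
    (l.foldl
      (fun (acc : List Char × Int) ch =>
        if ch = ' ' then (acc.1 ++ [ch], 0)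
        else if acc.2 = m then (acc.1 ++ [' ', ch], 1)
        else (acc.1 ++ [ch], acc.2 + 1)) (out, run)).1
      = out ++ pvStream m l run := by
  induction l with
  | nil => intro out run; simp [pvStream]
  | cons c cs ih =>
    intro out run
    by_cases hc : c = ' '
    · subst hc; simp [pvStream, ih]
    · by_cases hr : run = m <;> simp [pvStream, hc, hr, ih]

theorem pv_stream_split (m : Int) (l : List Char) : ∀ (run : Int),
    pvStream m l run
      = pvChunk m (pvSplitH l).1 run
        ++ (pvSplitH l).2.flatMap (fun w => ' ' :: pvChunk m w 0) := by
  induction l with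
  | nil => intro run; simp [pvStream, pvSplitH, pvChunk]
  | cons c cs ih =>
    intro run
    by_cases hc : c = ' '
    · subst hc; simp [pvStream, pvSplitH, pvChunk, ih]
    · by_cases hr : run = m <;> simp [pvStream, pvSplitH, pvChunk, hc, hr, ih]

theorem pv_chunk_of_le (m : Int) (w : List Char) : ∀ (run : Int), 0 ≤ run →
    run + (w.length : Int) ≤ m → pvChunk m w run = w := by
  induction w with
  | nil => intro run _ _; simp [pvChunk]
  | cons c cs ih =>
    intro run h0 hle
    have hlen : (List.length (c :: cs) : Int) = (cs.length : Int) + 1 := by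
      simp
    rw [hlen] at hle
    have hne : run ≠ m := by omega
    simp only [pvChunk, if_neg hne]
    rw [ih (run + 1) (by omega) (by omega)]

theorem pv_chunk_split (m : Int) (hm : 1 ≤ m) (w : List Char) : ∀ (run : Int), 0 ≤ run → run ≤ m →
    (m - run).toNat < w.length →
    pvChunk m w run
      = w.take (m - run).toNat ++ ' ' :: pvChunk m (w.drop (m - run).toNat) 0 := by
  induction w with
  | nil => intro run _ _ h; simp at h
  | cons c cs ih =>
    intro run h0 hmr hlt
    by_cases hr : run = m
    · simp only [pvChunk, if_pos hr]
      have h0' : (m - run).toNat = 0 := by omega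
      simp only [h0', List.take_zero, List.drop_zero, List.nil_append]
      simp only [pvChunk, if_neg (show (0 : Int) ≠ m by omega)]
      norm_num
    · have hrm : run < m := lt_of_le_of_ne hmr hr
      simp only [pvChunk, if_neg hr]
      have htn : (m - run).toNat = (m - (run + 1)).toNat + 1 := by omega
      rw [htn]
      simp only [List.take_succ_cons, List.drop_succ_cons, List.cons_append]
      have hlt' : (m - (run + 1)).toNat < cs.length := by
        simp only [List.length_cons] at hlt; omega
      rw [ih (run + 1) (by omega) (by omega) hlt']

theorem pv_join_append (sep : List Char) (xs ys : List (List Char))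
    (hx : xs ≠ []) (hy : ys ≠ []) :
    PySem.Chars.join sep (xs ++ ys)
      = PySem.Chars.join sep xs ++ sep ++ PySem.Chars.join sep ys := by
  induction xs with
  | nil => exact absurd rfl hx
  | cons p ps ih =>
    cases ps with
    | nil =>
      cases ys with
      | nil => exact absurd rfl hy
      | cons q qs => simp [PySem.Chars.join_cons_cons, PySem.Chars.join_singleton]
    | cons p2 ps2 =>
      rw [List.cons_append, List.cons_append, PySem.Chars.join_cons_cons,
        ← List.cons_append, ih (by simp), PySem.Chars.join_cons_cons]
      simp [List.append_assoc]

theorem pv_chunks_join (m : Int) (hm : 1 ≤ m) :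
    ∀ (n : Nat) (w : List Char), w.length ≤ n → 0 < w.length →
    PySem.Chars.join [' '] (pvChunksN m.toNat w ((w.length + m.toNat - 1) / m.toNat))
      = pvChunk m w 0 := by
  intro n
  induction n with
  | zero => intro w hw h0; omega
  | succ n ih =>
    intro w hw h0
    have hmN : 0 < m.toNat := by omega
    by_cases hle : w.length ≤ m.toNat
    · have hK : (w.length + m.toNat - 1) / m.toNat = 1 := by
        apply Nat.div_eq_of_lt_le
        · omega
        · omega
      rw [hK]
      simp only [pvChunksN, List.range_one, List.map_cons, List.map_nil, Nat.mul_zero,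
        List.drop_zero, List.take_of_length_le hle, PySem.Chars.join_singleton]
      rw [pv_chunk_of_le m w 0 le_rfl (by omega)]
    · rw [not_le] at hle
      have hK : (w.length + m.toNat - 1) / m.toNat
          = ((w.length - m.toNat) + m.toNat - 1) / m.toNat + 1 := by
        have h1 : w.length + m.toNat - 1 = ((w.length - m.toNat) + m.toNat - 1) + m.toNat := by
          omega
        rw [h1, Nat.add_div_right _ hmN]
      set w' := w.drop m.toNat with hw'
      have hlen' : w'.length = w.length - m.toNat := by simp [hw']
      have hK' : 0 < ((w.length - m.toNat) + m.toNat - 1) / m.toNat := by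
        exact Nat.div_pos (show m.toNat ≤ (w.length - m.toNat) + m.toNat - 1 by omega) hmN
      obtain ⟨K', hK'eq⟩ : ∃ K', ((w.length - m.toNat) + m.toNat - 1) / m.toNat = K' + 1 :=
        ⟨((w.length - m.toNat) + m.toNat - 1) / m.toNat - 1, by omega⟩
      rw [hK, hK'eq]
      have hrange : List.range (K' + 1 + 1) = 0 :: (List.range (K' + 1)).map Nat.succ :=
        List.range_succ_eq_map
      simp only [pvChunksN, hrange, List.map_cons, List.map_map, Nat.mul_zero,
        List.drop_zero]
      have hmap : (List.range (K' + 1)).map ((fun k => (w.drop (m.toNat * k)).take m.toNat) ∘ Nat.succ)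
          = pvChunksN m.toNat w' (K' + 1) := by
        simp only [pvChunksN]
        apply List.map_congr_left
        intro k _
        simp only [Function.comp_apply, Nat.succ_eq_add_one]
        rw [hw', List.drop_drop]
        congr 2
        ring
      rw [hmap]
      have hne : pvChunksN m.toNat w' (K' + 1) ≠ [] := by
        simp [pvChunksN]
      obtain ⟨q, qs, hqs⟩ := List.exists_cons_of_ne_nil hne
      rw [hqs, PySem.Chars.join_cons_cons, ← hqs]
      have hih : PySem.Chars.join [' ']
            (pvChunksN m.toNat w' ((w'.length + m.toNat - 1) / m.toNat))
          = pvChunk m w' 0 := by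
        apply ih
        · omega
        · omega
      rw [hlen'] at hih
      rw [hK'eq] at hih
      rw [hih]
      rw [pv_chunk_split m hm w 0 le_rfl (by omega) (by omega)]
      have hm0 : (m - 0).toNat = m.toNat := by omega
      rw [hm0, hw']
      simp

-- A's per-word result (short kept, long chunked) equals the streaming pass on that word.
theorem pv_gA_eq (m : Int) (hm : 1 ≤ m) (w : List Char) :
    PySem.Chars.join [' ']
      (if (w.length : Int) ≤ m then [w]
       else (PySem.List.pyRange 0 (w.length : Int) m).map
         (fun i => PySem.List.slice w (some i) (some (i + m))))
      = pvChunk m w 0 := by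
  by_cases hle : (w.length : Int) ≤ m
  · rw [if_pos hle, PySem.Chars.join_singleton,
      pv_chunk_of_le m w 0 le_rfl (by omega)]
  · rw [if_neg hle]
    rw [not_le] at hle
    obtain ⟨mN, rfl⟩ : ∃ mN : Nat, m = (mN : Int) := ⟨m.toNat, (Int.toNat_of_nonneg (by omega)).symm⟩
    rw [PySem.List.pyRange_of_pos 0 (w.length : Int) (by omega), if_pos (by omega)]
    rw [List.map_map]
    have hK : (((w.length : Int) - 0 + (mN : Int) - 1) / (mN : Int)).toNat
        = (w.length + mN - 1) / mN := by
      have h1 : ((w.length : Int) - 0 + (mN : Int) - 1) = ((w.length + mN - 1 : Nat) : Int) := by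
        omega
      rw [h1, ← Int.natCast_ediv, Int.toNat_natCast]
    rw [hK]
    have hmap : (List.range ((w.length + mN - 1) / mN)).map
          ((fun i => PySem.List.slice w (some i) (some (i + (mN : Int))))
            ∘ (fun k : Nat => 0 + (mN : Int) * (k : Int)))
        = pvChunksN mN w ((w.length + mN - 1) / mN) := by
      simp only [pvChunksN]
      apply List.map_congr_left
      intro k _
      simp only [Function.comp_apply]
      have h1 : ((0 : Int) + (mN : Int) * (k : Int)) = ((mN * k : Nat) : Int) := by
        push_cast; ring
      have h2 : ((0 : Int) + (mN : Int) * (k : Int) + (mN : Int)) = ((mN * k + mN : Nat) : Int) := by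
        push_cast; ring
      rw [h2, h1, PySem.List.slice_natCast, Nat.add_sub_cancel_left]
    rw [hmap]
    have hcj := pv_chunks_join (mN : Int) hm w.length w le_rfl (by omega)
    simpa using hcj

-- A's per-word parts list is never empty.
theorem pv_f_ne_nil (m : Int) (hm : 1 ≤ m) (w : List Char) :
    (if (w.length : Int) ≤ m then [w]
     else (PySem.List.pyRange 0 (w.length : Int) m).map
       (fun i => PySem.List.slice w (some i) (some (i + m)))) ≠ [] := by
  by_cases hle : (w.length : Int) ≤ m
  · simp [hle]
  · rw [if_neg hle]
    rw [not_le] at hle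
    have h0 : (0 : Int) ∈ PySem.List.pyRange 0 (w.length : Int) m := by
      rw [PySem.List.mem_pyRange_iff_of_pos (by omega)]
      refine ⟨le_rfl, by omega, by simp⟩
    exact List.ne_nil_of_mem (List.mem_map_of_mem h0)

-- join over the flattened parts list, one word at a time.
theorem pv_joinA (m : Int) (hm : 1 ≤ m) (ws : List (List Char)) : ∀ (w : List Char),
    PySem.Chars.join [' ']
      ((w :: ws).flatMap
        (fun word =>
          if (word.length : Int) ≤ m then [word]
          else (PySem.List.pyRange 0 (word.length : Int) m).map
            (fun i => PySem.List.slice word (some i) (some (i + m)))))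
      = pvChunk m w 0 ++ ws.flatMap (fun wi => ' ' :: pvChunk m wi 0) := by
  induction ws with
  | nil =>
    intro w
    simp only [List.flatMap_cons, List.flatMap_nil, List.append_nil]
    rw [pv_gA_eq m hm w]
  | cons w2 ws2 ih =>
    intro w
    rw [List.flatMap_cons]
    rw [pv_join_append [' '] _ _ (pv_f_ne_nil m hm w)
      (by rw [List.flatMap_cons]; intro h
          exact pv_f_ne_nil m hm w2 (List.append_eq_nil_iff.1 h).1)]
    rw [pv_gA_eq m hm w, ih w2]
    simp [List.append_assoc]

-- ===== VERDICT (by name: the statement is the Claim_ definition above) =====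
theorem break_long_words_spec : Claim_equal_break_long_words := by
  unfold Claim_equal_break_long_words
  intro text m hdom hpre
  unfold Spec_break_long_words
  by_cases ht : text = ""
  · simp [break_long_words, break_long_words_alt, ht]
  · have hm : 1 ≤ m := by
      rcases hpre with h | h
      · exact absurd h ht
      · exact h
    simp only [break_long_words, break_long_words_alt, if_neg ht]
    have hfun : (fun (parts : List (List Char)) word =>
        if (word.length : Int) ≤ m then parts ++ [word]
        else parts ++ (PySem.List.pyRange 0 (word.length : Int) m).map
          (fun i => PySem.List.slice word (some i) (some (i + m))))
        = fun (parts : List (List Char)) word => parts ++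
          (if (word.length : Int) ≤ m then [word]
           else (PySem.List.pyRange 0 (word.length : Int) m).map
             (fun i => PySem.List.slice word (some i) (some (i + m)))) := by
      funext parts word
      split <;> rfl
    rw [hfun, PySem.List.foldl_append_eq_flatMap, pv_splitOn_eq, List.nil_append]
    rw [pv_joinA m hm]
    rw [pv_foldl_stream m text.toList [] 0, List.nil_append]
    rw [pv_stream_split m text.toList 0]
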